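-- pv_equiv track=rewrite | github.com/AmnesiaBeing/epd_calendar | scripts/layout_debug.py | get_expr_nest_level
-- ===== SOURCE A (Python) =====
-- def get_expr_nest_level(expr: str) -> int:
--     """计算表达式中{}的嵌套层级（仅统计未转义的花括号）"""
--     level = 0
--     max_level = 0
--     escaped = False
--     for char in expr:
--         if escaped:
--             escaped = False
--             continue
--         if char == "\\":
--             escaped = True
--             continue
--         if char == "{":
--             level += 1
--             max_level = max(max_level, level)
--         elif char == "}":
--             level -= 1
--     return max_level
-- ===== SOURCE B (Python) =====
-- def get_expr_nest_level(expr: str) -> int: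
--     """Two-pass version: strip escape pairs first, then scan arithmetic deltas."""
--     cleaned = []
--     i = 0
--     n = len(expr)
--     while i < n:
--         if expr[i] == "\\":
--             i += 2  # backslash consumes the very next character (if any)
--         else:
--             cleaned.append(expr[i])
--             i += 1
--     bal = 0
--     mx = 0
--     for c in cleaned:
--         bal += (c == "{") - (c == "}")
--         if bal > mx:
--             mx = bal
--     return mx
-- ===== Notes on version B (the rewrite author's own statement) =====
-- stated objective: alternative
-- what changed: Replaces the single stateful loop with an escaped flag by two passes: a first pass deletes each backslash together with the character it escapes, and a second pass adds +1/-1 arithmetic deltas over the cleaned characters while tracking the running maximum.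
import Mathlib
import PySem

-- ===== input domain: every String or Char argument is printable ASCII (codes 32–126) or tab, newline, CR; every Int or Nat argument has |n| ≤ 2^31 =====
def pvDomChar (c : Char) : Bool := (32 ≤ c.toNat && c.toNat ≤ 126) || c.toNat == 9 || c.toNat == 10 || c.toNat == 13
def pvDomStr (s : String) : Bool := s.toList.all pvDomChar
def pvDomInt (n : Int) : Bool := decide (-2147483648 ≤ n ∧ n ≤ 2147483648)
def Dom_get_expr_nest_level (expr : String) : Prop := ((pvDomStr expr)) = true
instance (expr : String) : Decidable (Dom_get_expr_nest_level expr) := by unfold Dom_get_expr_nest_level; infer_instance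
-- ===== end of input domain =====

-- B splits A's single stateful scan into two passes (strip escape pairs, then an arithmetic
-- running-balance maximum); same O(n) cost, alternative decomposition.

-- ===== PORT A =====
def pvAStep (s : Int × Int × Bool) (c : Char) : Int × Int × Bool :=
  if s.2.2 then (s.1, s.2.1, false)
  else if c = '\\' then (s.1, s.2.1, true)
  else if c = '{' then (s.1 + 1, max s.2.1 (s.1 + 1), false)
  else if c = '}' then (s.1 - 1, s.2.1, false)
  else (s.1, s.2.1, false)

def get_expr_nest_level (expr : String) : Int :=
  (expr.toList.foldl pvAStep (0, 0, false)).2.1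

-- ===== PORT B =====
-- first pass of Source B: drop each backslash and the character right after it
def pvClean : List Char → List Char
  | [] => []
  | c :: rest =>
    if c = '\\' then
      match rest with
      | [] => []
      | _ :: r => pvClean r
    else c :: pvClean rest

-- second pass of Source B: bal += ('{') - ('}'); mx = bal if bal > mx
def pvBStep (s : Int × Int) (c : Char) : Int × Int :=
  let bal := s.1 + (if c = '{' then (1:Int) else 0) - (if c = '}' then (1:Int) else 0)
  (bal, if bal > s.2 then bal else s.2)

def get_expr_nest_level_alt (expr : String) : Int :=
  ((pvClean expr.toList).foldl pvBStep (0, 0)).2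

-- ===== PRECONDITION & SPEC =====
def Spec_get_expr_nest_level (expr : String) (out : Int) : Prop := out = get_expr_nest_level_alt expr
instance (expr : String) (out : Int) : Decidable (Spec_get_expr_nest_level expr out) := by unfold Spec_get_expr_nest_level; infer_instance

-- ===== CLAIM (what is proved, stated in full; the proofs are below) =====
def Claim_equal_get_expr_nest_level : Prop := ∀ (expr : String), Dom_get_expr_nest_level expr → Spec_get_expr_nest_level expr (get_expr_nest_level expr)

-- ===== LEMMAS AND PROOFS =====

-- ===== VERDICT (by name: the statement is the Claim_ definition above) =====
theorem pv_key : ∀ (cs : List Char) (level maxl : Int), level ≤ maxl →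
    (cs.foldl pvAStep (level, maxl, false)).2.1
      = ((pvClean cs).foldl pvBStep (level, maxl)).2 := by
  intro cs
  induction cs using pvClean.induct with
  | case1 => intro level maxl _; simp [pvClean]
  | case2 => intro level maxl _; simp [pvClean, pvAStep]
  | case3 head r ih =>
    intro level maxl hlm
    simpa [pvClean, pvAStep] using ih level maxl hlm
  | case4 head r h ih =>
    intro level maxl hlm
    have hc : pvClean (head :: r) = head :: pvClean r := by
      rw [pvClean.eq_def]; simp [h]
    rw [hc, List.foldl_cons, List.foldl_cons]
    have hs : pvAStep (level, maxl, false) head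
        = ((pvBStep (level, maxl) head).1, (pvBStep (level, maxl) head).2, false) := by
      by_cases h1 : head = '{' <;> by_cases h2 : head = '}'
      · simp_all
      · subst h1
        simp only [pvAStep, pvBStep, h, h2]
        simp [Prod.ext_iff]
        first | omega | (split_ifs <;> omega)
      · subst h2
        simp only [pvAStep, pvBStep, h, h1]
        simp [Prod.ext_iff]
        first | omega | (split_ifs <;> omega)
      · simp only [pvAStep, pvBStep, h, h1, h2]
        simp [Prod.ext_iff]
        first | omega | (split_ifs <;> omega)
    have hle : (pvBStep (level, maxl) head).1 ≤ (pvBStep (level, maxl) head).2 := by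
      simp only [pvBStep]
      split_ifs <;> omega
    rw [hs, ih _ _ hle]

-- ===== VERDICT (by name: the statement is the Claim_ definition above) =====
theorem get_expr_nest_level_spec : Claim_equal_get_expr_nest_level := by
  intro expr _
  unfold Spec_get_expr_nest_level get_expr_nest_level get_expr_nest_level_alt
  rw [pv_key _ _ _ le_rfl]
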